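-- pv_equiv track=rewrite | github.com/runnable38/redis-key-analyzer | redis_key_analyzer/rka/redis_key_analyzer.py | _replace_prefix
-- ===== SOURCE A (Python) =====
-- def _replace_prefix(
--     key: str,
--     prefixes: list[str],
--     separator: str,
--     separator_max_depth: int,
--     suffix_place_holder: str,
-- ) -> tuple[str, bool]:
--     if prefixes:
--         for prefix in prefixes:
--             if key.startswith(prefix):
--                 pattern = prefix + suffix_place_holder
--                 return pattern, True
--     if separator:
--         matches = find_all_occurrences(key, separator, limit=separator_max_depth)
--         if matches:
--             pattern = key[:matches[-1] + len(separator)] + suffix_place_holder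
--             return pattern, True
--     return key, False
--
-- def find_all_occurrences(key: str, pattern: str, limit: int | None = None) -> list[int]:
--     """
--     key: 입력 문자열
--     pattern: 찾을 패턴
--     limit: 찾을 최대 횟수 (None이면 제한 없음)
--     반환값: 매치 시작 인덱스들의 리스트
--     """
--     if not pattern:
--         raise ValueError("pattern 길이는 1 이상이어야 합니다.")
--
--     res = []
--     i = 0
--     L = len(pattern)
--     while True:
--         j = key.find(pattern, i)
--         if j == -1:
--             break
--         res.append(j)
--         if limit is not None and len(res) >= limit:
--             break
--         i = j + L  # 겹치지 않게 다음 검색 시작 위치 이동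
--     return res
-- ===== SOURCE B (Python) =====
-- def _replace_prefix(
--     key: str,
--     prefixes: list[str],
--     separator: str,
--     separator_max_depth: int,
--     suffix_place_holder: str,
-- ) -> tuple[str, bool]:
--     hit = next((p for p in prefixes if key.startswith(p)), None)
--     if hit is not None:
--         return hit + suffix_place_holder, True
--     if separator:
--         # at least one segment is always collapsed when the separator occurs
--         parts = key.split(separator, max(separator_max_depth, 1))
--         if len(parts) > 1:
--             return separator.join(parts[:-1]) + separator + suffix_place_holder, True
--     return key, False
-- ===== Notes on version B (the rewrite author's own statement) =====
-- stated objective: alternative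
-- what changed: B replaces the repeated-find scan that builds the full list of match indices (find_all_occurrences) with a single str.split(separator, max(depth,1)) followed by joining all but the last piece, and uses next() over a generator for the prefix search.
import Mathlib
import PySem

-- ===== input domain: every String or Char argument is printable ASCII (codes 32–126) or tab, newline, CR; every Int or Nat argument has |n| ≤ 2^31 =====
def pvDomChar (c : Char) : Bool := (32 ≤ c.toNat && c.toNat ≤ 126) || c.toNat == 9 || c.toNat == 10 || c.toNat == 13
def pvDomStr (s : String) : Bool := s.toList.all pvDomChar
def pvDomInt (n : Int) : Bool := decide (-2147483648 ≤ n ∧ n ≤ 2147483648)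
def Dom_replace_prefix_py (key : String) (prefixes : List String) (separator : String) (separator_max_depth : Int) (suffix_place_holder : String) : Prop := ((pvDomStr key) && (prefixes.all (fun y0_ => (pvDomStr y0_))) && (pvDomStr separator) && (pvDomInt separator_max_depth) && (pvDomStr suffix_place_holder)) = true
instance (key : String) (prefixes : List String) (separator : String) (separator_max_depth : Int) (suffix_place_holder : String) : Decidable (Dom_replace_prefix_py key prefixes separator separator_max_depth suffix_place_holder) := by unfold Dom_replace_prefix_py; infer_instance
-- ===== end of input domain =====

-- B replaces the repeated-`find` scan building all match indices with one
-- `split(sep, max(depth,1))` + join of all pieces but the last (objective: alternative).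

-- ===== PORT A =====
-- first-occurrence facts about findFrom, cited by the loop's termination proof
theorem pv_findFrom_facts (s sub : List Char) (i : Nat)
    (h : PySem.Chars.findFrom s sub (i : Int) none ≠ -1) :
    i ≤ s.length ∧ (i : Int) ≤ PySem.Chars.findFrom s sub (i : Int) none := by
  by_cases hi : i ≤ s.length
  · rw [PySem.Chars.findFrom_natCast s sub i hi] at h ⊢
    split at h
    · exact absurd rfl h
    · rename_i hf
      have := PySem.Chars.neg_one_le_find (List.drop i s) sub
      simp only [if_neg hf]
      omega
  · exfalso
    apply h
    simp only [PySem.Chars.findFrom]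
    have : (s.length : Int) < (i : Int) := by exact_mod_cast Nat.lt_of_not_le hi
    rw [if_pos (by omega)]

-- the while-loop of find_all_occurrences (res accumulates absolute match indices)
def pvFaocGo (key pattern : List Char) (hp : pattern ≠ []) (limit : Int)
    (res : List Int) (i : Nat) : List Int :=
  let j := PySem.Chars.findFrom key pattern (i : Int) none
  if hj : j = -1 then res
  else
    let res' := res ++ [j]
    if ((res'.length : Int) ≥ limit) then res'
    else pvFaocGo key pattern hp limit res' (j.toNat + pattern.length)
termination_by key.length + 1 - i
decreasing_by
  have hfacts := pv_findFrom_facts key pattern i hj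
  have hL : 0 < pattern.length := List.length_pos_iff.mpr hp
  omega

-- find_all_occurrences; `none` is Python's ValueError on an empty pattern
def pvFindAllOccurrences (key pattern : List Char) (limit : Int) : Option (List Int) :=
  if hp : pattern = [] then none
  else some (pvFaocGo key pattern hp limit [] 0)

-- `for prefix in prefixes: if key.startswith(prefix): return …` (first hit)
def pvPrefixLoopA (key : String) : List String → Option String
  | [] => none
  | p :: rest => if PySem.Str.startswith key p then some p else pvPrefixLoopA key rest

def replace_prefix_py (key : String) (prefixes : List String) (separator : String)
    (separator_max_depth : Int) (suffix_place_holder : String) : String × Bool :=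
  match (if prefixes ≠ [] then pvPrefixLoopA key prefixes else none) with
  | some pfx => (String.mk (pfx.toList ++ suffix_place_holder.toList), true)
  | none =>
    if separator.toList ≠ [] then
      match pvFindAllOccurrences key.toList separator.toList separator_max_depth with
      | none => (key, false)  -- unreachable: separator ≠ '' here
      | some ms =>
        if ms ≠ [] then
          match PySem.List.pyGet? ms (-1) with  -- matches[-1]
          | some m =>
            (String.mk (PySem.List.slice key.toList none
                (some (m + (separator.toList.length : Int))) ++ suffix_place_holder.toList),
             true)
          | none => (key, false)  -- unreachable: matches ≠ []
        else (key, false)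
    else (key, false)

-- ===== PORT B =====
def replace_prefix_py_alt (key : String) (prefixes : List String) (separator : String)
    (separator_max_depth : Int) (suffix_place_holder : String) : String × Bool :=
  match prefixes.find? (fun p => PySem.Str.startswith key p) with
  | some hit => (String.mk (hit.toList ++ suffix_place_holder.toList), true)
  | none =>
    if separator.toList ≠ [] then
      let parts := PySem.Chars.splitOnMax key.toList separator.toList (max separator_max_depth 1)
      if parts.length > 1 then
        (String.mk (PySem.Chars.join separator.toList parts.dropLast ++ separator.toList ++
            suffix_place_holder.toList),
         true)
      else (key, false)
    else (key, false)

-- ===== PRECONDITION & SPEC =====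
def Spec_replace_prefix_py (key : String) (prefixes : List String) (separator : String) (separator_max_depth : Int) (suffix_place_holder : String) (out : String × Bool) : Prop := out = replace_prefix_py_alt key prefixes separator separator_max_depth suffix_place_holder
instance (key : String) (prefixes : List String) (separator : String) (separator_max_depth : Int) (suffix_place_holder : String) (out : String × Bool) : Decidable (Spec_replace_prefix_py key prefixes separator separator_max_depth suffix_place_holder out) := by unfold Spec_replace_prefix_py; infer_instance

-- ===== CLAIM (what is proved, stated in full; the proofs are below) =====
def Claim_equal_replace_prefix_py : Prop := ∀ (key : String) (prefixes : List String) (separator : String) (separator_max_depth : Int) (suffix_place_holder : String), Dom_replace_prefix_py key prefixes separator separator_max_depth suffix_place_holder → Spec_replace_prefix_py key prefixes separator separator_max_depth suffix_place_holder (replace_prefix_py key prefixes separator separator_max_depth suffix_place_holder)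

-- ===== LEMMAS AND PROOFS =====

-- reference decomposition: pieces cut at the first ≤ m non-overlapping occurrences of p
def pvChop (p : List Char) : Nat → List Char → List (List Char)
  | 0, s => [s]
  | m + 1, s =>
    let j := PySem.Chars.find s p
    if j = -1 then [s]
    else s.take j.toNat :: pvChop p m (s.drop (j.toNat + p.length))

-- reference occurrence list: the first ≤ m+1 non-overlapping occurrences of p, as offsets
def pvOffs (p : List Char) : Nat → List Char → List Nat
  | 0, _ => []
  | m + 1, s =>
    let j := PySem.Chars.find s p
    if j = -1 then []
    else j.toNat :: (pvOffs p m (s.drop (j.toNat + p.length))).map (· + (j.toNat + p.length))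

theorem pvChop_ne_nil (p : List Char) (m : Nat) (s : List Char) : pvChop p m s ≠ [] := by
  cases m with
  | zero => simp [pvChop]
  | succ n => simp only [pvChop]; split <;> simp

theorem pv_find_of_prefix (s p : List Char) (hp : p ≠ []) (h : p <+: s) :
    PySem.Chars.find s p = 0 := by
  have hinf : p <:+: s := h.isInfix
  have hnn : 0 ≤ PySem.Chars.find s p := by
    have h1 : PySem.Chars.find s p ≠ -1 := fun he => ((PySem.Chars.find_eq_neg_one_iff s p).mp he) hinf
    have := PySem.Chars.neg_one_le_find s p
    omega
  obtain ⟨h1, h2⟩ := PySem.Chars.find_spec hnn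
  by_cases hz : (PySem.Chars.find s p).toNat = 0
  · omega
  · exact absurd (by simpa using h) (h2 0 (by omega))

theorem pv_find_cons (c : Char) (rest p : List Char) (hp : p ≠ [])
    (h : ¬ p <+: (c :: rest)) :
    PySem.Chars.find (c :: rest) p =
      if PySem.Chars.find rest p = -1 then -1 else PySem.Chars.find rest p + 1 := by
  split
  · rename_i hr
    rw [PySem.Chars.find_eq_neg_one_iff] at hr ⊢
    rw [List.infix_cons_iff]
    tauto
  · rename_i hr
    have hfr : 0 ≤ PySem.Chars.find rest p := by
      have := PySem.Chars.neg_one_le_find rest p; omega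
    obtain ⟨hr1, hr2⟩ := PySem.Chars.find_spec hfr
    have hinf : p <:+: (c :: rest) := List.infix_cons_iff.mpr (Or.inr (by
      by_contra hni
      exact hr ((PySem.Chars.find_eq_neg_one_iff rest p).mpr hni)))
    have hg : 0 ≤ PySem.Chars.find (c :: rest) p := by
      have h1 : PySem.Chars.find (c::rest) p ≠ -1 := fun he => ((PySem.Chars.find_eq_neg_one_iff (c::rest) p).mp he) hinf
      have := PySem.Chars.neg_one_le_find (c::rest) p
      omega
    obtain ⟨hg1, hg2⟩ := PySem.Chars.find_spec hg
    have hle : (PySem.Chars.find (c :: rest) p).toNat ≤ (PySem.Chars.find rest p).toNat + 1 := by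
      by_contra hlt
      exact hg2 ((PySem.Chars.find rest p).toNat + 1) (by omega) (by simpa using hr1)
    have hge : (PySem.Chars.find rest p).toNat + 1 ≤ (PySem.Chars.find (c :: rest) p).toNat := by
      rcases Nat.eq_zero_or_pos (PySem.Chars.find (c :: rest) p).toNat with h0 | h0
      · rw [h0] at hg1; simp at hg1; exact absurd hg1 h
      · obtain ⟨k, hk⟩ : ∃ k, (PySem.Chars.find (c :: rest) p).toNat = k + 1 := ⟨_, (Nat.succ_pred_eq_of_pos h0).symm⟩
        rw [hk] at hg1
        simp only [List.drop_succ_cons] at hg1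
        by_contra hlt
        exact hr2 k (by omega) hg1
    omega

theorem pv_take_of_prefix_drop (s p : List Char) (k : Nat) (h : p <+: s.drop k) :
    s.take (k + p.length) = s.take k ++ p := by
  rw [List.take_add]
  congr 1
  obtain ⟨t, ht⟩ := h
  rw [← ht]
  exact List.take_left

-- splitOnMax.go characterised by pvChop
theorem pv_go_chop (p : List Char) (hp : p ≠ []) :
    ∀ (fuel : Nat) (l cur : List Char) (macc : List (List Char)) (m : Nat),
      l.length < fuel →
      PySem.Chars.splitOnMax.go p fuel m l cur macc =
        macc.reverse ++ ((cur.reverse ++ (pvChop p m l).headI) :: (pvChop p m l).tail) := by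
  intro fuel
  induction fuel with
  | zero => intro l cur macc m h; omega
  | succ fuel ih =>
    intro l cur macc m h
    match l with
    | [] =>
      rw [PySem.Chars.splitOnMax.go]
      case x_7 => omega
      cases m with
        | zero => simp [pvChop]
        | succ n =>
          have hf : PySem.Chars.find ([] : List Char) p = -1 := by
            rw [PySem.Chars.find_eq_neg_one_iff]
            simp [List.infix_nil, hp]
          simp [pvChop, hf]
    | c :: rest =>
      rw [PySem.Chars.splitOnMax.go]
      cases m with
      | zero => simp [pvChop]
      | succ n =>
        simp only [Nat.succ_ne_zero, if_false, Nat.add_sub_cancel]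
        by_cases hpre : p.isPrefixOf (c :: rest) = true
        · rw [if_pos hpre]
          have hpfx : p <+: (c :: rest) := List.isPrefixOf_iff_prefix.mp hpre
          have hf0 : PySem.Chars.find (c :: rest) p = 0 := pv_find_of_prefix _ _ hp hpfx
          have hlen : 0 < p.length := List.length_pos_iff.mpr hp
          rw [ih _ [] (cur.reverse :: macc) n
            (by simp only [List.length_cons] at h; simp only [List.length_drop, List.length_cons]; omega)]
          have hC := pvChop_ne_nil p n (List.drop p.length (c :: rest))
          obtain ⟨h0, t0, hCe⟩ := List.exists_cons_of_ne_nil hC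
          simp only [pvChop, hf0]
          norm_num
          rw [hCe]
          simp
        · rw [if_neg hpre]
          have hnpfx : ¬ p <+: (c :: rest) := fun hx => hpre (List.isPrefixOf_iff_prefix.mpr hx)
          have hfc := pv_find_cons c rest p hp hnpfx
          rw [ih rest (c :: cur) macc (n+1) (by simp at h ⊢; omega)]
          by_cases hr : PySem.Chars.find rest p = -1
          · rw [if_pos hr] at hfc
            simp [pvChop, hfc, hr]
          · rw [if_neg hr] at hfc
            have hnn : 0 ≤ PySem.Chars.find rest p := by
              have := PySem.Chars.neg_one_le_find rest p; omega
            have ht : (PySem.Chars.find rest p + 1).toNat = (PySem.Chars.find rest p).toNat + 1 := by omega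
            have harr : (PySem.Chars.find rest p).toNat + 1 + p.length
                = (PySem.Chars.find rest p).toNat + p.length + 1 := by omega
            simp only [pvChop, hfc, if_neg hr,
              if_neg (show ¬(PySem.Chars.find rest p + 1 = -1) by omega), ht, harr,
              List.take_succ_cons, List.drop_succ_cons]
            simp

-- the A-loop characterised by pvOffs
theorem pv_faoc_offs (key p : List Char) (hp : p ≠ []) (limit : Int)
    (i : Nat) (res : List Int) (hi : i ≤ key.length) :
    pvFaocGo key p hp limit res i =
      res ++ (pvOffs p (max (limit - res.length) 1).toNat (key.drop i)).map
        (fun n => ((n + i : Nat) : Int)) := by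
  have hL : 0 < p.length := List.length_pos_iff.mpr hp
  obtain ⟨t, hm⟩ : ∃ t, (max (limit - res.length) 1).toNat = t + 1 :=
    ⟨(max (limit - res.length) 1).toNat - 1, by omega⟩
  rw [pvFaocGo]
  simp only [PySem.Chars.findFrom_natCast key p i hi, hm, pvOffs]
  by_cases hf : PySem.Chars.find (List.drop i key) p = -1
  · rw [if_pos hf, dif_pos rfl, if_pos hf]
    simp
  · have hf0 : 0 ≤ PySem.Chars.find (List.drop i key) p := by
      have := PySem.Chars.neg_one_le_find (List.drop i key) p; omega
    rw [if_neg hf, dif_neg (by omega), if_neg hf]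
    obtain ⟨hpre, -⟩ := PySem.Chars.find_spec hf0
    have hlen : (PySem.Chars.find (List.drop i key) p).toNat + p.length ≤ key.length - i := by
      have h1 := hpre.length_le
      simp only [List.length_drop] at h1
      omega
    by_cases hbrk : ((res ++ [(i : Int) + PySem.Chars.find (List.drop i key) p]).length : Int) ≥ limit
    · rw [if_pos hbrk]
      have ht0 : t = 0 := by
        simp only [List.length_append, List.length_cons, List.length_nil] at hbrk
        omega
      subst ht0
      simp only [pvOffs, List.map_nil, List.map_cons, List.map_nil]
      have heq : (i : Int) + PySem.Chars.find (List.drop i key) p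
          = (((PySem.Chars.find (List.drop i key) p).toNat + i : Nat) : Int) := by
        push_cast; omega
      rw [heq]
    · rw [if_neg hbrk]
      have hjt : ((i : Int) + PySem.Chars.find (List.drop i key) p).toNat
          = i + (PySem.Chars.find (List.drop i key) p).toNat := by omega
      have hi' : ((i : Int) + PySem.Chars.find (List.drop i key) p).toNat + p.length
          ≤ key.length := by omega
      rw [pv_faoc_offs key p hp limit _ _ hi']
      have hm' : (max (limit - ((res ++ [(i : Int) + PySem.Chars.find (List.drop i key) p]).length : Int)) 1).toNat = t := by
        simp only [List.length_append, List.length_cons, List.length_nil] at hbrk ⊢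
        omega
      rw [hm']
      have hdd : List.drop (((i : Int) + PySem.Chars.find (List.drop i key) p).toNat + p.length) key
          = List.drop ((PySem.Chars.find (List.drop i key) p).toNat + p.length) (List.drop i key) := by
        rw [List.drop_drop]
        congr 1
        omega
      rw [hdd]
      simp only [List.map_cons, List.map_map, List.append_assoc, List.singleton_append]
      congr 1
      congr 1
      · push_cast; omega
      · apply List.map_congr_left
        intro n _
        simp only [Function.comp_apply]
        congr 1
        omega
termination_by key.length + 1 - i
decreasing_by
  have := PySem.Chars.neg_one_le_find (List.drop i key) p
  omega

-- one-step equations for the reference functions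
theorem pvOffs_succ_eq (p s : List Char) (m : Nat) (hf : PySem.Chars.find s p ≠ -1) :
    pvOffs p (m + 1) s = (PySem.Chars.find s p).toNat ::
      (pvOffs p m (s.drop ((PySem.Chars.find s p).toNat + p.length))).map
        (· + ((PySem.Chars.find s p).toNat + p.length)) := by
  simp only [pvOffs, if_neg hf]

theorem pvOffs_succ_nil (p s : List Char) (m : Nat) (hf : PySem.Chars.find s p = -1) :
    pvOffs p (m + 1) s = [] := by
  simp only [pvOffs, if_pos hf]

theorem pvChop_succ_eq (p s : List Char) (m : Nat) (hf : PySem.Chars.find s p ≠ -1) :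
    pvChop p (m + 1) s = s.take (PySem.Chars.find s p).toNat ::
      pvChop p m (s.drop ((PySem.Chars.find s p).toNat + p.length)) := by
  simp only [pvChop, if_neg hf]

theorem pvChop_succ_nil (p s : List Char) (m : Nat) (hf : PySem.Chars.find s p = -1) :
    pvChop p (m + 1) s = [s] := by
  simp only [pvChop, if_pos hf]

theorem pv_getLastD_map_add (c : Nat) : ∀ (xs : List Nat) (d : Nat),
    (xs.map (· + c)).getLastD d = if xs = [] then d else xs.getLastD 0 + c := by
  intro xs
  induction xs with
  | nil => intro d; simp
  | cons x l ih =>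
    intro d
    simp only [List.map_cons, List.getLastD_cons]
    rw [ih (x + c)]
    cases l with
    | nil => simp
    | cons a t =>
      rw [if_neg (List.cons_ne_nil x (a :: t)), List.getLastD_cons, List.getLastD_cons,
        if_neg (List.cons_ne_nil a t)]

-- last cut position vs join-of-dropLast
theorem pv_offs_chop (p : List Char) (hp : p ≠ []) :
    ∀ (m : Nat) (s : List Char), PySem.Chars.find s p ≠ -1 →
      pvOffs p (m + 1) s ≠ [] ∧
      s.take ((pvOffs p (m + 1) s).getLastD 0 + p.length) =
        PySem.Chars.join p (pvChop p (m + 1) s).dropLast ++ p := by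
  intro m
  induction m with
  | zero =>
    intro s hf
    have hf0 : 0 ≤ PySem.Chars.find s p := by
      have := PySem.Chars.neg_one_le_find s p; omega
    obtain ⟨hpre, -⟩ := PySem.Chars.find_spec hf0
    rw [pvOffs_succ_eq p s 0 hf, pvChop_succ_eq p s 0 hf]
    refine ⟨by simp, ?_⟩
    simp only [pvOffs, pvChop, List.map_nil, List.getLastD_cons, List.getLastD_nil]
    rw [pv_take_of_prefix_drop s p _ hpre]
    simp [PySem.Chars.join_singleton]
  | succ m ih =>
    intro s hf
    have hf0 : 0 ≤ PySem.Chars.find s p := by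
      have := PySem.Chars.neg_one_le_find s p; omega
    obtain ⟨hpre, -⟩ := PySem.Chars.find_spec hf0
    rw [pvOffs_succ_eq p s (m + 1) hf, pvChop_succ_eq p s (m + 1) hf]
    by_cases hf' : PySem.Chars.find (s.drop ((PySem.Chars.find s p).toNat + p.length)) p = -1
    · rw [pvOffs_succ_nil p _ m hf', pvChop_succ_nil p _ m hf']
      refine ⟨by simp, ?_⟩
      simp only [List.map_nil, List.getLastD_cons, List.getLastD_nil]
      rw [pv_take_of_prefix_drop s p _ hpre]
      simp [PySem.Chars.join_singleton]
    · obtain ⟨hne', hih⟩ := ih _ hf'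
      refine ⟨by simp, ?_⟩
      rw [List.getLastD_cons,
        pv_getLastD_map_add ((PySem.Chars.find s p).toNat + p.length) _ _, if_neg hne']
      have harith : (pvOffs p (m + 1) (s.drop ((PySem.Chars.find s p).toNat + p.length))).getLastD 0
            + ((PySem.Chars.find s p).toNat + p.length) + p.length
          = ((PySem.Chars.find s p).toNat + p.length)
            + ((pvOffs p (m + 1) (s.drop ((PySem.Chars.find s p).toNat + p.length))).getLastD 0
              + p.length) := by omega
      rw [harith, List.take_add, pv_take_of_prefix_drop s p _ hpre, hih]
      -- chop side: the tail decomposition has at least two pieces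
      have hC2 : pvChop p (m + 1) (s.drop ((PySem.Chars.find s p).toNat + p.length)) =
          (s.drop ((PySem.Chars.find s p).toNat + p.length)).take
              (PySem.Chars.find (s.drop ((PySem.Chars.find s p).toNat + p.length)) p).toNat ::
            pvChop p m ((s.drop ((PySem.Chars.find s p).toNat + p.length)).drop
              ((PySem.Chars.find (s.drop ((PySem.Chars.find s p).toNat + p.length)) p).toNat
                + p.length)) := pvChop_succ_eq p _ m hf'
      have hCtail := pvChop_ne_nil p m ((s.drop ((PySem.Chars.find s p).toNat + p.length)).drop
        ((PySem.Chars.find (s.drop ((PySem.Chars.find s p).toNat + p.length)) p).toNat + p.length))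
      rw [hC2] at hih ⊢
      rw [List.dropLast_cons_of_ne_nil hCtail] at hih
      rw [List.dropLast_cons_of_ne_nil (List.cons_ne_nil _ _),
        List.dropLast_cons_of_ne_nil hCtail, PySem.Chars.join_cons_cons]
      simp [List.append_assoc]

theorem pv_prefixLoop_eq_find? (key : String) (l : List String) :
    pvPrefixLoopA key l = l.find? (fun p => PySem.Str.startswith key p) := by
  induction l with
  | nil => rfl
  | cons p rest ih =>
    simp only [pvPrefixLoopA, List.find?]
    by_cases h : PySem.Str.startswith key p = true <;>
      simp only [PySem.Str.startswith_eq] at h <;> simp [h, ih]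

theorem pv_pyGet_neg_one {α : Type} (xs : List α) (h : xs ≠ []) :
    PySem.List.pyGet? xs (-1) = xs.getLast? := by
  have hpos : 0 < xs.length := List.length_pos_iff.mpr h
  simp only [PySem.List.pyGet?, PySem.List.pyIdx?]
  rw [if_neg (by omega), if_pos (by omega)]
  norm_num
  exact (List.getLast?_eq_getElem? (l := xs)).symm

-- ===== VERDICT (by name: the statement is the Claim_ definition above) =====
theorem replace_prefix_py_spec : Claim_equal_replace_prefix_py := by
  unfold Claim_equal_replace_prefix_py
  intro key prefixes separator d ph _dom
  unfold Spec_replace_prefix_py replace_prefix_py replace_prefix_py_alt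
  have hpl : (if prefixes ≠ [] then pvPrefixLoopA key prefixes else none)
      = prefixes.find? (fun p => PySem.Str.startswith key p) := by
    by_cases hpre : prefixes = []
    · subst hpre; simp
    · rw [if_pos hpre, pv_prefixLoop_eq_find?]
  rw [hpl]
  cases hfind : prefixes.find? (fun p => PySem.Str.startswith key p) with
  | some hit => rfl
  | none =>
    simp only
    by_cases hsep : separator.toList = []
    · rw [if_neg (by simpa using hsep), if_neg (by simpa using hsep)]
    · rw [if_pos (by simpa using hsep), if_pos (by simpa using hsep)]
      simp only [pvFindAllOccurrences, dif_neg hsep]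
      rw [pv_faoc_offs key.toList separator.toList hsep d 0 [] (by omega)]
      have hmax0 : 0 ≤ max d 1 := by omega
      obtain ⟨t, hm⟩ : ∃ t, (max d 1).toNat = t + 1 := ⟨(max d 1).toNat - 1, by omega⟩
      have hmA : (max (d - (([] : List Int).length : Int)) 1).toNat = t + 1 := by
        simpa using hm
      rw [hmA]
      have hfuel : key.toList.length < key.toList.length + 1 := by omega
      have hgo := pv_go_chop separator.toList hsep (key.toList.length + 1) key.toList [] [] (t + 1) hfuel
      have hchopne := pvChop_ne_nil separator.toList (t + 1) key.toList
      simp only [PySem.Chars.splitOnMax, if_neg (by omega : ¬ (max d 1) < 0), hm, hgo,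
        List.drop_zero, List.reverse_nil, List.nil_append]
      by_cases hf : PySem.Chars.find key.toList separator.toList = -1
      · rw [pvOffs_succ_nil _ _ _ hf, pvChop_succ_nil _ _ _ hf]
        simp
      · obtain ⟨hne, hjoin⟩ := pv_offs_chop separator.toList hsep t key.toList hf
        have hrec : (pvChop separator.toList (t + 1) key.toList).headI ::
            (pvChop separator.toList (t + 1) key.toList).tail
            = pvChop separator.toList (t + 1) key.toList := by
          obtain ⟨c0, cs, hc⟩ := List.exists_cons_of_ne_nil hchopne
          rw [hc]
          rfl
        rw [hrec]
        have hmapne : (pvOffs separator.toList (t + 1) key.toList).map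
            (fun n => ((n + 0 : Nat) : Int)) ≠ [] := by simpa using hne
        rw [if_pos hmapne, pv_pyGet_neg_one _ hmapne, List.getLast?_map]
        obtain ⟨v, hv⟩ : ∃ v, (pvOffs separator.toList (t + 1) key.toList).getLast? = some v := by
          cases hx : (pvOffs separator.toList (t + 1) key.toList).getLast? with
          | none => exact absurd (List.getLast?_eq_none_iff.mp hx) hne
          | some v => exact ⟨v, rfl⟩
        have hvD : (pvOffs separator.toList (t + 1) key.toList).getLastD 0 = v := by
          rw [List.getLastD_eq_getLast?, hv]; rfl
        rw [hv, Option.map_some]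
        have hlen2 : (pvChop separator.toList (t + 1) key.toList).length > 1 := by
          rw [pvChop_succ_eq _ _ _ hf]
          have hnn := pvChop_ne_nil separator.toList t (key.toList.drop
            ((PySem.Chars.find key.toList separator.toList).toNat + separator.toList.length))
          have := List.length_pos_iff.mpr hnn
          simp only [List.length_cons, gt_iff_lt]
          omega
        rw [if_pos hlen2]
        have htoNat : (((v : Nat) : Int) + (separator.toList.length : Int)).toNat
            = v + separator.toList.length := by omega
        have hslice : PySem.List.slice key.toList none
            (some (((v : Nat) : Int) + (separator.toList.length : Int)))
            = key.toList.take ((((v : Nat) : Int) + (separator.toList.length : Int)).toNat) :=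
          PySem.List.slice_to _ (by omega)
        split
        rename_i m hm3
        simp only [Nat.add_zero] at hm3
        injection hm3 with hm3
        rw [← hm3, hslice, htoNat, ← hvD, hjoin]
        simp [List.append_assoc]
        rename_i heq4
        simp at heq4
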